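-- pv_equiv track=rewrite | github.com/An0tar/Machine-learning | Module14/07_years/task7.py | same_num
-- ===== SOURCE A (Python) =====
-- def same_num(num):
--     flag = False
--     for i in range(0,10):
--         check = 0
--         for sym in str(num):
--             if i == int(sym):
--                 check += 1
--             if check >= 3:
--                 flag = True
--     return flag
-- ===== SOURCE B (Python) =====
-- def same_num(num):
--     counts = {}
--     for ch in str(num):
--         d = int(ch)
--         counts[d] = counts.get(d, 0) + 1
--     return any(c >= 3 for c in counts.values())
-- ===== Notes on version B (the rewrite author's own statement) =====
-- stated objective: simpler
-- what changed: Replaces A's ten passes over str(num) (one per candidate digit, with a running check counter and a sticky flag) by a single pass building a digit-count table, then one check over the table's values.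
import Mathlib
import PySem

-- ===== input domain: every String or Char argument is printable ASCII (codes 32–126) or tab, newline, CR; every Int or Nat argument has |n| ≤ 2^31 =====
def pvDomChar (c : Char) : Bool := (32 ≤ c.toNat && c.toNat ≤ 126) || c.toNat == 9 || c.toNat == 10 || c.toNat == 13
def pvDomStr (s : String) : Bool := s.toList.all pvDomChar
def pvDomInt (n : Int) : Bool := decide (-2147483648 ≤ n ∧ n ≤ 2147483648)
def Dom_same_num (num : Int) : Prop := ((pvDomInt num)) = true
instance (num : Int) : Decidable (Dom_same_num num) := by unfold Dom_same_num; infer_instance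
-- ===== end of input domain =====

-- B replaces A's ten passes over str(num) by one counting pass plus a check over the table (simpler).
-- Pre_ excludes num < 0, where int('-') makes BOTH programs raise ValueError.


-- ===== PORT A =====
-- int(sym)/int(ch): PySem.Int.ofChars? returns none exactly where Python raises ValueError;
-- under Pre_ (num ≥ 0) every character of str(num) is a decimal digit, so the .getD (-1)
-- default is never taken (both Pythons raise ValueError for num < 0, excluded by Pre_).
def digVal (c : Char) : Int := (PySem.Int.ofChars? [c]).getD (-1)

def same_num (num : Int) : Bool :=
  (PySem.List.pyRange 0 10 1).foldl (fun flag i =>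
      ((PySem.Int.toChars num).foldl
        (fun (st : Bool × Int) sym =>
          let check := if i == digVal sym then st.2 + 1 else st.2
          let flag' := if check ≥ 3 then true else st.1
          (flag', check))
        (flag, 0)).1)
    false

-- ===== PORT B =====
def same_num_alt (num : Int) : Bool :=
  let counts := (PySem.Int.toChars num).foldl
      (fun (d : PySem.Dict Int Int) ch =>
        let k := digVal ch
        d.insert k (d.getD k 0 + 1))
      PySem.Dict.empty
  counts.values.any (fun c => c ≥ 3)

-- ===== PRECONDITION & SPEC =====
-- Pre_: num ≥ 0; for num < 0, str(num) starts with '-' and int('-') raises ValueError in BOTH A and B.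
def Pre_same_num (num : Int) : Prop := 0 ≤ num
instance (num : Int) : Decidable (Pre_same_num num) := by unfold Pre_same_num; infer_instance
def pvWitness_same_num : Int := 1222

def Spec_same_num (num : Int) (out : Bool) : Prop := out = same_num_alt num
instance (num : Int) (out : Bool) : Decidable (Spec_same_num num out) := by unfold Spec_same_num; infer_instance

-- ===== CLAIM (what is proved, stated in full; the proofs are below) =====
def Claim_equal_same_num : Prop := ∀ (num : Int), Dom_same_num num → Pre_same_num num → Spec_same_num num (same_num num)

-- ===== LEMMAS AND PROOFS =====

def digitChars : List Char := ['0','1','2','3','4','5','6','7','8','9']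

lemma digitChar_mem_digitChars (d : Nat) (h : d < 10) : Nat.digitChar d ∈ digitChars := by
  interval_cases d <;> decide

lemma toDigitsCore_mem (fuel : Nat) : ∀ (n : Nat) (ds : List Char),
    (∀ c ∈ ds, c ∈ digitChars) → ∀ c ∈ Nat.toDigitsCore 10 fuel n ds, c ∈ digitChars := by
  induction fuel with
  | zero => intro n ds hds c hc; exact hds c hc
  | succ fuel ih =>
    intro n ds hds c hc
    unfold Nat.toDigitsCore at hc
    have hmem : ∀ c' ∈ Nat.digitChar (n % 10) :: ds, c' ∈ digitChars := by
      intro c' hc'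
      rw [List.mem_cons] at hc'
      rcases hc' with h | h
      · subst h; exact digitChar_mem_digitChars _ (Nat.mod_lt _ (by norm_num))
      · exact hds c' h
    by_cases h : n / 10 = 0
    · simp only [h] at hc
      exact hmem c hc
    · simp only [if_neg h] at hc
      exact ih _ _ hmem c hc

lemma mem_toChars_digit {num : Int} (h : 0 ≤ num) :
    ∀ c ∈ PySem.Int.toChars num, c ∈ digitChars := by
  intro c hc
  unfold PySem.Int.toChars at hc
  rw [if_neg (by omega)] at hc
  exact toDigitsCore_mem _ _ _ (by simp) c hc

lemma digVal_bounds {c : Char} (h : c ∈ digitChars) : 0 ≤ digVal c ∧ digVal c < 10 := by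
  fin_cases h <;> decide

-- the inner loop of A: running check plus sticky flag equals a count comparison
lemma inner_loop (i : Int) : ∀ (s : List Char) (flag : Bool) (check : Int),
    s.foldl (fun (st : Bool × Int) sym =>
        let check := if i == digVal sym then st.2 + 1 else st.2
        let flag' := if check ≥ 3 then true else st.1
        (flag', check)) (flag, check)
    = (flag || (decide (s ≠ []) && decide (3 ≤ check + (s.countP (fun c => i == digVal c) : Int))),
       check + (s.countP (fun c => i == digVal c) : Int)) := by
  intro s
  induction s with
  | nil => intro flag check; simp
  | cons c t ih =>
    intro flag check
    have hcnt : (0:Int) ≤ (t.countP (fun c => i == digVal c) : Int) := by positivity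
    by_cases hc : (i == digVal c) = true <;>
      [simp only [List.foldl_cons, List.countP_cons, hc, if_true];
       simp only [List.foldl_cons, List.countP_cons, hc]] <;>
    rw [ih, Prod.mk.injEq] <;>
    refine ⟨?_, by push_cast; ring⟩ <;>
    · rw [Bool.eq_iff_iff]
      cases flag <;> by_cases ht : t = [] <;> simp [ht] <;> omega
  
lemma foldl_or_any {α : Type} (g : α → Bool) : ∀ (l : List α) (b : Bool),
    l.foldl (fun a x => a || g x) b = (b || l.any g) := by
  intro l
  induction l with
  | nil => simp
  | cons x t ih => intro b; rw [List.foldl_cons, ih, List.any_cons, Bool.or_assoc]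

-- ===== VERDICT (by name: the statement is the Claim_ definition above) =====
set_option maxRecDepth 8192 in
theorem same_num_spec : Claim_equal_same_num := by
  intro num _ hpre
  unfold Spec_same_num same_num same_num_alt
  have hdig := mem_toChars_digit hpre
  set s := PySem.Int.toChars num with hs
  -- A's outer loop: rewrite each inner pass with inner_loop, then fold the ors into `any`
  have hfun : (fun (flag : Bool) (i : Int) =>
      (s.foldl (fun (st : Bool × Int) sym =>
          let check := if i == digVal sym then st.2 + 1 else st.2
          let flag' := if check ≥ 3 then true else st.1
          (flag', check)) (flag, 0)).1)
      = fun (flag : Bool) (i : Int) =>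
          flag || (decide (s ≠ []) && decide (3 ≤ (0:Int) + (s.countP (fun c => i == digVal c) : Int))) := by
    funext flag i; rw [inner_loop]
  rw [hfun, foldl_or_any, Bool.false_or]
  -- B: the counting loop is Counter(map digVal s)
  have hB : (s.foldl (fun (d : PySem.Dict Int Int) ch =>
        let k := digVal ch
        d.insert k (d.getD k 0 + 1)) PySem.Dict.empty)
      = PySem.Dict.counter (s.map digVal) := by
    rw [← PySem.Dict.foldl_insert_getD_add_one_eq_counter, List.foldl_map]
  rw [hB]
  have hvals : (PySem.Dict.counter (s.map digVal)).values
      = (PySem.Set.ofList (s.map digVal)).map (fun k => ((s.map digVal).count k : Int)) := by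
    show ((PySem.Dict.counter (s.map digVal)).items).map (·.2) = _
    rw [PySem.Dict.items_counter]
    simp
  simp only [hvals, List.any_map]
  -- counts agree: countP (i == digVal ·) s = (s.map digVal).count i
  have hcount : ∀ i : Int, (s.countP (fun c => i == digVal c)) = (s.map digVal).count i := by
    intro i
    rw [List.count_eq_countP, List.countP_map]
    refine List.countP_congr ?_
    intro c _
    simp only [Function.comp_apply]
    by_cases h : i = digVal c
    · simp [h]
    · simp [h, Ne.symm h]
  rw [Bool.eq_iff_iff]
  rw [List.any_eq_true, List.any_eq_true]
  simp only [PySem.List.mem_pyRange_one, PySem.Set.mem_ofList, Bool.and_eq_true,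
    Function.comp_apply, ge_iff_le, decide_eq_true_eq]
  simp only [hcount]
  constructor
  · rintro ⟨i, ⟨h0, h10⟩, hne, hcnt⟩
    refine ⟨i, ?_, ?_⟩
    · rw [← List.count_pos_iff]; omega
    · omega
  · rintro ⟨k, hk, hcnt⟩
    rcases List.mem_map.mp hk with ⟨c, hc, rfl⟩
    have hb := digVal_bounds (hdig c hc)
    refine ⟨digVal c, ⟨hb.1, hb.2⟩, ?_, ?_⟩
    · intro h; rw [h] at hc; exact List.not_mem_nil hc
    · omega
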